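-- pv_equiv track=rewrite | github.com/hieunugent/pythonProjectEuler | leetcodes/delete_dublicate.py | append_time
-- ===== SOURCE A (Python) =====
-- def delete_duplicate(A):
--     if not A:
--         return []
--     write_idx = 1
--     for i in range (1, len(A)):
--         if A[write_idx-1] != A[i]:
--             A[write_idx] = A[i]
--             write_idx += 1
--     A = A[:write_idx]
--     return A
--
-- def append_time(A, m):
--     if not A:
--         return []
--
--     minAppear = min(2,m)
--     if minAppear ==1 :
--         return delete_duplicate(A)
--     else:
--         A = delete_duplicate(A)
--         for i in range(0, len(A)):
--             A.append(A[i])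
--     return sorted(A)
-- ===== SOURCE B (Python) =====
-- def append_time(A, m):
--     dedup = []
--     for x in A:
--         if not dedup or dedup[-1] != x:
--             dedup.append(x)
--     if min(2, m) == 1:
--         return dedup
--     return [x for x in sorted(dedup) for _ in range(2)]
-- ===== Notes on version B (the rewrite author's own statement) =====
-- stated objective: simpler
-- what changed: Replaces the in-place write-index compaction with a single-pass accumulator dedup, and replaces A's append-each-element-then-sort with sort-first-then-emit-each-value-twice (a flat comprehension); B also does not mutate the caller's list.
import Mathlib
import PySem

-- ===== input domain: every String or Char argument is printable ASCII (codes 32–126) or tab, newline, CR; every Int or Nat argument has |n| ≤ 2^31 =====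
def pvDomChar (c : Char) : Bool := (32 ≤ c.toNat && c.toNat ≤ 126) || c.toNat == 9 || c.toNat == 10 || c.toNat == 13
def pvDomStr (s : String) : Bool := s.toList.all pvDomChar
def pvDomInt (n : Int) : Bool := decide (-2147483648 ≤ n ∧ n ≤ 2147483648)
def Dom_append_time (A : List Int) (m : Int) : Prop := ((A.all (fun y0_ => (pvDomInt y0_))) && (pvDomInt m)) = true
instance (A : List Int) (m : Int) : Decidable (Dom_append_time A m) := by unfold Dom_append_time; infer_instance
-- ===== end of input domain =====

-- B changes the decomposition (accumulator-based consecutive dedup; sort first, then emit each value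
-- twice) for simplicity; A mutates its argument in place, B does not: equivalence is about the RETURN value only.

-- ===== PORT A =====
-- delete_duplicate: in-place compaction with a write index, simulated on an immutable list with
-- List.set; every read/write is at an in-range nonnegative index, so getElem! is exact here.
def delete_dup (A : List Int) : List Int :=
  if A = [] then []
  else
    let st := (List.range' 1 (A.length - 1)).foldl
      (fun (st : List Int × Nat) i =>
        if st.1[st.2 - 1]! ≠ st.1[i]! then (st.1.set st.2 (st.1[i]!), st.2 + 1) else st)
      (A, 1)
    st.1.take st.2

def append_time (A : List Int) (m : Int) : List Int :=
  if A = [] then []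
  else
    let minAppear := min (2 : Int) m
    if minAppear = 1 then delete_dup A
    else
      let d := delete_dup A
      -- for i in range(0, len(A)): A.append(A[i]) — range's len(A) is evaluated once, before the loop
      let d2 := (List.range' 0 d.length).foldl (fun acc i => acc ++ [acc[i]!]) d
      PySem.List.sorted d2 (fun x => x) false

-- ===== PORT B =====
-- dedup[-1] on a list the guard has shown nonempty is its last element: ported as getLast? (exact)
def append_time_alt (A : List Int) (m : Int) : List Int :=
  let dedup := A.foldl (fun acc x => if acc = [] ∨ acc.getLast? ≠ some x then acc ++ [x] else acc) []
  if min (2 : Int) m = 1 then dedup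
  else (PySem.List.sorted dedup (fun x => x) false).flatMap (fun x => [x, x])

-- ===== PRECONDITION & SPEC =====
def Spec_append_time (A : List Int) (m : Int) (out : List Int) : Prop := out = append_time_alt A m
instance (A : List Int) (m : Int) (out : List Int) : Decidable (Spec_append_time A m out) := by unfold Spec_append_time; infer_instance

-- ===== CLAIM (what is proved, stated in full; the proofs are below) =====
def Claim_equal_append_time : Prop := ∀ (A : List Int) (m : Int), Dom_append_time A m → Spec_append_time A m (append_time A m)

-- ===== LEMMAS AND PROOFS =====

def ddFrom (l : Int) : List Int → List Int
  | [] => []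
  | x :: t => if l = x then ddFrom l t else x :: ddFrom x t

lemma loopA (r : List Int) : ∀ (d j : List Int) (l : Int),
    (let st := (List.range' (d.length + 1 + j.length) r.length).foldl
      (fun (st : List Int × Nat) i =>
        if st.1[st.2 - 1]! ≠ st.1[i]! then (st.1.set st.2 (st.1[i]!), st.2 + 1) else st)
      ((d ++ [l]) ++ j ++ r, d.length + 1)
     st.1.take st.2) = (d ++ [l]) ++ ddFrom l r := by
  induction r with
  | nil =>
    intro d j l
    simp only [List.length_nil, List.range'_zero, List.foldl_nil, List.append_nil, ddFrom]
    rw [show d.length + 1 = (d ++ [l]).length by simp]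
    exact List.take_left
  | cons x r' ih =>
    intro d j l
    simp only [List.length_cons, List.range'_succ, List.foldl_cons]
    have hA : ((d ++ [l]) ++ (j ++ (x :: r')))[d.length + 1 - 1]! = l := by
      rw [getElem!_pos _ _ (by simp)]
      simp only [Nat.add_sub_cancel]
      rw [List.getElem_append_left (by simp)]
      rw [List.getElem_append_right (le_refl _)]
      simp
    have hB : ((d ++ [l]) ++ (j ++ (x :: r')))[d.length + 1 + j.length]! = x := by
      rw [getElem!_pos _ _ (by simp; omega)]
      rw [List.getElem_append_right (by simp : (d ++ [l]).length ≤ d.length + 1 + j.length)]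
      simp
    simp only [List.append_assoc] at hA hB ⊢
    rw [hA, hB]
    by_cases hx : l = x
    · subst hx
      rw [if_neg (by simp)]
      have h2 := ih d (j ++ [l]) l
      rw [show ddFrom l (l :: r') = ddFrom l r' by simp [ddFrom]]
      rw [show d.length + 1 + j.length + 1 = d.length + 1 + (j ++ [l]).length by simp; omega]
      simp only [List.append_assoc, List.cons_append, List.nil_append] at h2 ⊢
      exact h2
    · rw [if_pos (by exact hx)]
      rw [show d ++ ([l] ++ (j ++ (x :: r'))) = (d ++ [l]) ++ (j ++ x :: r') by simp]
      rw [List.set_append_right _ _ (by simp : (d ++ [l]).length ≤ d.length + 1)]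
      cases j with
      | nil =>
        have h2 := ih (d ++ [l]) [] x
        rw [show ddFrom l (x :: r') = x :: ddFrom x r' by simp [ddFrom, hx]]
        simp only [List.length_append, List.length_cons, List.length_nil, List.append_assoc,
          List.cons_append, List.nil_append, List.set_cons_zero, Nat.sub_self,
          Nat.zero_add] at h2 ⊢
        exact h2
      | cons y j2 =>
        have h2 := ih (d ++ [l]) (j2 ++ [x]) x
        rw [show ddFrom l (x :: r') = x :: ddFrom x r' by simp [ddFrom, hx]]
        simp only [List.length_append, List.length_cons, List.length_nil, List.append_assoc,
          List.cons_append, List.nil_append, List.set_cons_zero, Nat.sub_self,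
          Nat.zero_add] at h2 ⊢
        rw [show d.length + 1 + (j2.length + 1) + 1 = d.length + 1 + 1 + (j2.length + 1) by omega]
        exact h2

lemma foldB (r : List Int) : ∀ (d : List Int) (l : Int),
    r.foldl (fun acc x => if acc = [] ∨ acc.getLast? ≠ some x then acc ++ [x] else acc) (d ++ [l])
      = (d ++ [l]) ++ ddFrom l r := by
  induction r with
  | nil => intro d l; simp [ddFrom]
  | cons x r' ih =>
    intro d l
    rw [List.foldl_cons]
    by_cases hx : l = x
    · subst hx
      rw [if_neg (by simp)]
      rw [show ddFrom l (l :: r') = ddFrom l r' by simp [ddFrom]]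
      exact ih d l
    · rw [if_pos (by simp; exact fun h => (hx h).elim)]
      rw [show ddFrom l (x :: r') = x :: ddFrom x r' by simp [ddFrom, hx]]
      have h2 := ih (d ++ [l]) x
      simp only [List.append_assoc, List.cons_append, List.nil_append] at h2 ⊢
      exact h2

lemma appLoop (k : Nat) : ∀ (s : Nat) (d : List Int), s + k = d.length →
    (List.range' s k).foldl (fun acc i => acc ++ [acc[i]!]) (d ++ d.take s) = d ++ d := by
  induction k with
  | zero => intro s d h; simp [show s = d.length by omega]
  | succ k ih =>
    intro s d h
    rw [List.range'_succ, List.foldl_cons]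
    have hs : s < d.length := by omega
    have hget : (d ++ d.take s)[s]! = d[s] := by
      rw [getElem!_pos _ _ (by simp; omega), List.getElem_append_left hs]
    rw [hget, List.append_assoc, List.take_append_getElem hs]
    exact ih (s + 1) d (by omega)

lemma flatMap_perm_double (d : List Int) : (d.flatMap (fun x => [x, x])).Perm (d ++ d) := by
  induction d with
  | nil => simp
  | cons x t ih =>
    simp only [List.flatMap_cons, List.cons_append]
    refine List.Perm.trans (by exact (ih.cons x).cons x) ?_
    exact (List.perm_middle.symm.cons x)

lemma flatMap_pairwise (d : List Int) (h : d.Pairwise (· ≤ ·)) :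
    (d.flatMap (fun x => [x, x])).Pairwise (· ≤ ·) := by
  induction d with
  | nil => simp
  | cons x t ih =>
    rw [List.pairwise_cons] at h
    simp only [List.flatMap_cons, List.cons_append, List.nil_append, List.pairwise_cons]
    refine ⟨?_, ?_, ih h.2⟩
    · intro y hy
      simp only [List.mem_cons, List.mem_flatMap] at hy
      rcases hy with h1 | hy
      · omega
      · rcases hy with ⟨z, hz, hyz⟩
        simp at hyz
        subst hyz; exact h.1 _ hz
    · intro y hy
      simp only [List.mem_flatMap] at hy
      rcases hy with ⟨z, hz, hyz⟩
      simp at hyz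
      subst hyz; exact h.1 _ hz

lemma dedup_eq (A : List Int) :
    delete_dup A
      = A.foldl (fun acc x => if acc = [] ∨ acc.getLast? ≠ some x then acc ++ [x] else acc) [] := by
  cases A with
  | nil => simp [delete_dup]
  | cons x xs =>
    rw [delete_dup, if_neg (by simp)]
    have hL := loopA xs [] [] x
    have hR := foldB xs [] x
    simp only [List.nil_append] at hL hR
    rw [List.foldl_cons, if_pos (by simp), List.nil_append, hR]
    simpa using hL

lemma double_sorted (d : List Int) :
    PySem.List.sorted (d ++ d) (fun x => x) false
      = (PySem.List.sorted d (fun x => x) false).flatMap (fun x => [x, x]) := by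
  apply PySem.List.sorted_id_eq_of_perm_of_pairwise
  · exact (List.Perm.flatMap_right _ (PySem.List.sorted_perm d (fun x => x) false)).trans
      (flatMap_perm_double d)
  · apply flatMap_pairwise
    simpa using PySem.List.sorted_pairwise (xs := d) (key := fun x => x)

lemma double_loop_eq (d : List Int) :
    (List.range' 0 d.length).foldl (fun acc i => acc ++ [acc[i]!]) d = d ++ d := by
  have := appLoop d.length 0 d (by omega)
  simpa using this

-- ===== VERDICT (by name: the statement is the Claim_ definition above) =====
theorem append_time_spec : Claim_equal_append_time := by
  intro A m _
  unfold Spec_append_time append_time append_time_alt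
  by_cases hA : A = []
  · subst hA
    by_cases hm : min (2 : Int) m = 1 <;>
      simp [hm, show PySem.List.sorted ([] : List Int) (fun x => x) false = [] from rfl]
  · rw [if_neg hA]
    by_cases hm : min (2 : Int) m = 1
    · simp only [hm, if_pos]
      exact dedup_eq A
    · simp only [hm, ite_false]
      rw [double_loop_eq, double_sorted, dedup_eq]
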